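-- pv_equiv track=rewrite | github.com/unoselab/ManageCodeClones | AST_Clone_Extractability/nicad_block_to_function_mapper.py | choose_enclosing_method
-- ===== SOURCE A (Python) =====
-- from typing import Any, Dict, Iterable, List, Mapping, MutableMapping, Optional, Sequence, Tuple, Union
--
-- def ranges_overlap(a_start: int, a_end: int, b_start: int, b_end: int) -> bool:
--     """Return True if two inclusive ranges [a_start, a_end] and [b_start, b_end] overlap."""
--     return not (a_end < b_start or b_end < a_start)
--
-- def choose_enclosing_method(
--     methods: Iterable[Mapping[str, Any]],
--     clone_start: int,
--     clone_end: int,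
-- ) -> Tuple[Optional[Mapping[str, Any]], bool]:
--     """
--     Pick the best method for this clone range.
--
--     Returns:
--       (chosen_method, is_function_clone)
--
--     Strategy:
--       1) If any method exactly matches clone range => function clone.
--       2) Else choose the *smallest* method that fully contains the clone range (enclosing).
--       3) Else fall back to an overlapping method with the smallest span.
--     """
--     ms: List[Mapping[str, Any]] = []
--     for m in methods:
--         try:
--             m_start = int(m.get("start_line", 0))
--             m_end = int(m.get("end_line", 0))
--         except Exception:
--             continue
--         if m_start <= 0 or m_end <= 0:
--             continue
--         ms.append(m)
--
--     if not ms: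
--         return None, False
--
--     # 1) exact match => function clone
--     for m in ms:
--         if int(m["start_line"]) == clone_start and int(m["end_line"]) == clone_end:
--             return m, True
--
--     # 2) enclosing candidates (prefer smallest span)
--     enclosing = [
--         m for m in ms if int(m["start_line"]) <= clone_start and int(m["end_line"]) >= clone_end
--     ]
--     if enclosing:
--         enclosing.sort(
--             key=lambda m: (
--                 int(m.get("span") or (int(m["end_line"]) - int(m["start_line"]) + 1)),
--                 int(m["start_line"]),
--             )
--         )
--         return enclosing[0], False
--
--     # 3) overlapping fallback (prefer smallest span)
--     overlapping = [
--         m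
--         for m in ms
--         if ranges_overlap(int(m["start_line"]), int(m["end_line"]), clone_start, clone_end)
--     ]
--     if overlapping:
--         overlapping.sort(
--             key=lambda m: (
--                 int(m.get("span") or (int(m["end_line"]) - int(m["start_line"]) + 1)),
--                 int(m["start_line"]),
--             )
--         )
--         return overlapping[0], False
--
--     return None, False
-- ===== SOURCE B (Python) =====
-- from typing import Any, Iterable, Mapping, Optional, Tuple
--
-- def choose_enclosing_method(
--     methods: Iterable[Mapping[str, Any]],
--     clone_start: int,
--     clone_end: int,
-- ) -> Tuple[Optional[Mapping[str, Any]], bool]: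
--     """Single pass: keep the method with the smallest composite key
--     (tier, span, start_line, input index), where tier 0 = exact match,
--     1 = enclosing, 2 = overlapping (others skipped)."""
--     best = None  # (key, method)
--     for idx, m in enumerate(methods):
--         try:
--             s = int(m.get("start_line", 0))
--             e = int(m.get("end_line", 0))
--         except Exception:
--             continue
--         if s <= 0 or e <= 0:
--             continue
--         if s == clone_start and e == clone_end:
--             key = (0, 0, 0, idx)
--         elif s <= clone_start and e >= clone_end:
--             key = (1, int(m.get("span") or (e - s + 1)), s, idx)
--         elif not (e < clone_start or clone_end < s):
--             key = (2, int(m.get("span") or (e - s + 1)), s, idx)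
--         else:
--             continue
--         if best is None or key < best[0]:
--             best = (key, m)
--     if best is None:
--         return None, False
--     return best[1], best[0][0] == 0
-- ===== Notes on version B (the rewrite author's own statement) =====
-- stated objective: alternative
-- what changed: Replaces the exact-match scan plus two filtered-list builds and tuple-key sorts with a single pass that keeps the running minimum of a composite key (tier, span, start_line, index), where tier 0 = exact, 1 = enclosing, 2 = overlapping; the index component reproduces A's first-match / stable-sort tie-breaking.
import Mathlib
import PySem

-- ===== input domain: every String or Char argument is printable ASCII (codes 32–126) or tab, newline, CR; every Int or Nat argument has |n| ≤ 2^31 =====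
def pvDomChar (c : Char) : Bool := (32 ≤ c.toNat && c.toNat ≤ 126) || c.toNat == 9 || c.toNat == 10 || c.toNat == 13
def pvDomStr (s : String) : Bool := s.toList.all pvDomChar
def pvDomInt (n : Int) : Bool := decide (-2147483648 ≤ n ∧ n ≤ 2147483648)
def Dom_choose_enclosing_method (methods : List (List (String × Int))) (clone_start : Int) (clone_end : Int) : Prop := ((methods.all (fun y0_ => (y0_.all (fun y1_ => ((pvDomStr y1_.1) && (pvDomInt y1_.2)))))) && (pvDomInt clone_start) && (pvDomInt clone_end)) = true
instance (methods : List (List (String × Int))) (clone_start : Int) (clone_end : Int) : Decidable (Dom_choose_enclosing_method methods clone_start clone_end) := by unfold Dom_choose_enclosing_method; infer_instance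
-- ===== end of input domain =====

-- B replaces the exact-match scan plus two filtered lists and their tuple-key sorts by one
-- pass keeping the running minimum of a composite key (tier, span, start_line, index).

-- ===== PORT A =====
-- dict access: m.get(k, 0) / m[k] (keys of m guaranteed present with value > 0 wherever A subscripts)
def pvGetI (m : List (String × Int)) (k : String) : Int := PySem.Dict.getD (PySem.Dict.mk m) k 0

def pvRangesOverlap (aS aE bS bE : Int) : Bool := !(decide (aE < bS) || decide (bE < aS))

def pvStartA (m : List (String × Int)) : Int := pvGetI m "start_line"
def pvEndA (m : List (String × Int)) : Int := pvGetI m "end_line"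

-- int(m.get("span") or (end - start + 1)): Python treats a stored 0 (and a missing key) as falsy
def pvSpanA (m : List (String × Int)) : Int :=
  match PySem.Dict.get? (PySem.Dict.mk m) "span" with
  | some v => if v = 0 then pvEndA m - pvStartA m + 1 else v
  | none => pvEndA m - pvStartA m + 1

def choose_enclosing_method (methods : List (List (String × Int))) (clone_start : Int) (clone_end : Int) : (Option (List (String × Int))) × Bool :=
  -- the try/except around int() is unreachable here: all values are already Int
  let ms := methods.filter (fun m => !(decide (pvStartA m ≤ 0) || decide (pvEndA m ≤ 0)))
  if ms.isEmpty then (none, false)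
  else
    match ms.find? (fun m => decide (pvStartA m = clone_start) && decide (pvEndA m = clone_end)) with
    | some m => (some m, true)
    | none =>
      let enclosing := ms.filter (fun m => decide (pvStartA m ≤ clone_start) && decide (pvEndA m ≥ clone_end))
      if enclosing.isEmpty then
        let overlapping := ms.filter (fun m => pvRangesOverlap (pvStartA m) (pvEndA m) clone_start clone_end)
        if overlapping.isEmpty then (none, false)
        else ((PySem.List.sorted2 overlapping pvSpanA pvStartA).head?, false)
      else ((PySem.List.sorted2 enclosing pvSpanA pvStartA).head?, false)

-- ===== PORT B =====
-- Python tuple '<' on the 4-tuple keys, lexicographic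
def pvKeyLt (a b : Int × Int × Int × Int) : Bool :=
  decide (a.1 < b.1) ||
    (a.1 == b.1 && (decide (a.2.1 < b.2.1) ||
      (a.2.1 == b.2.1 && (decide (a.2.2.1 < b.2.2.1) ||
        (a.2.2.1 == b.2.2.1 && decide (a.2.2.2 < b.2.2.2))))))

-- loop body of B: the candidate key of method m at index idx (none = skipped)
def pvCand (idx : Int) (m : List (String × Int)) (cs ce : Int) : Option (Int × Int × Int × Int) :=
  let s := PySem.Dict.getD (PySem.Dict.mk m) "start_line" 0
  let e := PySem.Dict.getD (PySem.Dict.mk m) "end_line" 0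
  if decide (s ≤ 0) || decide (e ≤ 0) then none
  else if decide (s = cs) && decide (e = ce) then some (0, 0, 0, idx)
  else
    let span := match PySem.Dict.get? (PySem.Dict.mk m) "span" with
      | some v => if v = 0 then e - s + 1 else v
      | none => e - s + 1
    if decide (s ≤ cs) && decide (e ≥ ce) then some (1, span, s, idx)
    else if !(decide (e < cs) || decide (ce < s)) then some (2, span, s, idx)
    else none

def choose_enclosing_method_alt (methods : List (List (String × Int))) (clone_start : Int) (clone_end : Int) : (Option (List (String × Int))) × Bool :=
  let best := (PySem.List.enumerate methods 0).foldl
    (fun best p =>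
      match pvCand p.1 p.2 clone_start clone_end with
      | none => best
      | some k =>
        match best with
        | none => some (k, p.2)
        | some b => if pvKeyLt k b.1 then some (k, p.2) else some b) none
  match best with
  | none => (none, false)
  | some b => (some b.2, b.1.1 == 0)

-- ===== PRECONDITION & SPEC =====
def Spec_choose_enclosing_method (methods : List (List (String × Int))) (clone_start : Int) (clone_end : Int) (out : (Option (List (String × Int))) × Bool) : Prop := out = choose_enclosing_method_alt methods clone_start clone_end
instance (methods : List (List (String × Int))) (clone_start : Int) (clone_end : Int) (out : (Option (List (String × Int))) × Bool) : Decidable (Spec_choose_enclosing_method methods clone_start clone_end out) := by unfold Spec_choose_enclosing_method; infer_instance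

-- ===== CLAIM (what is proved, stated in full; the proofs are below) =====
def Claim_equal_choose_enclosing_method : Prop := ∀ (methods : List (List (String × Int))) (clone_start : Int) (clone_end : Int), Dom_choose_enclosing_method methods clone_start clone_end → Spec_choose_enclosing_method methods clone_start clone_end (choose_enclosing_method methods clone_start clone_end)

-- ===== LEMMAS AND PROOFS =====

-- first strict-minimum of a list under a boolean "strictly earlier" test (= the running-best loop)
def pvFm {α : Type} (lt : α → α → Bool) (xs : List α) : Option α :=
  xs.foldl (fun acc x => match acc with | none => some x | some m => if lt x m then some x else some m) none

theorem pvFm_acc {α : Type} (lt : α → α → Bool)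
    (htr : ∀ a b c, lt a b = true → lt b c = true → lt a c = true)
    (hng : ∀ a b c, lt a b = false → lt b c = false → lt a c = false)
    (xs : List α) (a : α) :
    xs.foldl (fun acc x => match acc with | none => some x | some m => if lt x m then some x else some m) (some a)
      = some (match pvFm lt xs with | none => a | some b => if lt b a then b else a) := by
  induction xs generalizing a with
  | nil => simp [pvFm]
  | cons x t ih =>
    have hfm : pvFm lt (x :: t)
        = some (match pvFm lt t with | none => x | some b => if lt b x then b else x) := by
      simp only [pvFm, List.foldl_cons]
      exact ih x
    simp only [List.foldl_cons, hfm]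
    have hacc : (if lt x a = true then some x else some a) = some (if lt x a = true then x else a) := by
      by_cases h1 : lt x a = true <;> simp [h1]
    rw [hacc, ih (if lt x a = true then x else a)]
    cases hft : pvFm lt t with
    | none =>
      by_cases h1 : lt x a = true <;> simp [h1]
    | some b =>
      simp only []
      by_cases h1 : lt x a = true <;> by_cases h2 : lt b x = true
      · have := htr b x a h2 h1
        simp [h1, h2, this]
      · simp only [h1, if_true, h2, if_false]
        by_cases h3 : lt b a = true <;> simp [h1, h2, h3]
      · simp only [h1]
        by_cases h3 : lt b a = true <;> simp [h1, h2, h3]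
      · have h1' : lt x a = false := by simpa using h1
        have h2' : lt b x = false := by simpa using h2
        have := hng b x a h2' h1'
        simp [h1, h2, this]

theorem pvFm_cons {α : Type} (lt : α → α → Bool)
    (htr : ∀ a b c, lt a b = true → lt b c = true → lt a c = true)
    (hng : ∀ a b c, lt a b = false → lt b c = false → lt a c = false)
    (x : α) (xs : List α) :
    pvFm lt (x :: xs) = some (match pvFm lt xs with | none => x | some b => if lt b x then b else x) := by
  simp only [pvFm, List.foldl_cons]
  exact pvFm_acc lt htr hng xs x

theorem pvFm_mem {α : Type} (lt : α → α → Bool) (xs : List α) (x : α)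
    (h : pvFm lt xs = some x) : x ∈ xs := by
  have aux : ∀ (t : List α) (acc : Option α),
      t.foldl (fun acc x => match acc with | none => some x | some m => if lt x m then some x else some m) acc = some x →
      acc = some x ∨ x ∈ t := by
    intro t
    induction t with
    | nil => intro acc h; exact Or.inl h
    | cons y t ih =>
      intro acc h
      simp only [List.foldl_cons] at h
      rcases ih _ h with h' | h'
      · cases acc with
        | none =>
          simp only [Option.some.injEq] at h'
          exact Or.inr (by simp [h'])
        | some m =>
          have h'' : (if lt y m then some y else some m) = some x := h'
          by_cases hl : lt y m = true
          · rw [if_pos hl] at h''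
            simp only [Option.some.injEq] at h''
            exact Or.inr (by simp [h''])
          · rw [if_neg hl] at h''
            exact Or.inl h''
      · exact Or.inr (List.mem_cons_of_mem _ h')
  rcases aux xs none h with h' | h'
  · cases h'
  · exact h'

theorem pvFm_ne_none {α : Type} (lt : α → α → Bool) (xs : List α) (a : α) :
    ∃ b, xs.foldl (fun acc x => match acc with | none => some x | some m => if lt x m then some x else some m) (some a) = some b := by
  induction xs generalizing a with
  | nil => exact ⟨a, rfl⟩
  | cons x t ih =>
    simp only [List.foldl_cons]
    by_cases h : lt x a = true
    · simpa [h] using ih x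
    · simpa [h] using ih a

theorem pvFm_nil_iff {α : Type} (lt : α → α → Bool) (xs : List α) :
    pvFm lt xs = none ↔ xs = [] := by
  cases xs with
  | nil => simp [pvFm]
  | cons x t =>
    simp only [pvFm, List.foldl_cons]
    obtain ⟨b, hb⟩ := pvFm_ne_none lt t x
    simp [hb]

theorem pvFm_map {α β : Type} (f : α → β) (lt : β → β → Bool) (xs : List α) :
    pvFm lt (xs.map f) = Option.map f (pvFm (fun a b => lt (f a) (f b)) xs) := by
  have aux : ∀ (t : List α) (acc : Option α),
      (t.map f).foldl (fun acc x => match acc with | none => some x | some m => if lt x m then some x else some m) (Option.map f acc)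
        = Option.map f (t.foldl (fun acc x => match acc with | none => some x | some m => if lt (f x) (f m) then some x else some m) acc) := by
    intro t
    induction t with
    | nil => intro acc; rfl
    | cons y t ih =>
      intro acc
      simp only [List.map_cons, List.foldl_cons]
      cases acc with
      | none => exact ih (some y)
      | some m =>
        by_cases h : lt (f y) (f m) = true
        · simpa [h] using ih (some y)
        · simpa [h] using ih (some m)
  simpa using aux xs none

-- head of the stable insertion sort = first strict-minimum
theorem pvInsertBy_head {α : Type} (before : α → α → Bool) (x : α) (l : List α) :
    (PySem.List.insertBy before x l).head? = some (match l.head? with | none => x | some y => if before x y then x else y) := by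
  cases l with
  | nil => rfl
  | cons y t =>
    by_cases h : before x y = true <;> simp [PySem.List.insertBy, h]

theorem pvHead_foldl_insertBy {α : Type} (before : α → α → Bool) (xs : List α) :
    (xs.foldl (fun acc x => PySem.List.insertBy before x acc) []).head? = pvFm before xs := by
  induction xs using List.reverseRecOn with
  | nil => rfl
  | append_singleton t x ih =>
    rw [List.foldl_append, List.foldl_cons, List.foldl_nil, pvInsertBy_head, ih]
    show _ = pvFm before (t ++ [x])
    simp only [pvFm, List.foldl_append, List.foldl_cons, List.foldl_nil]
    cases hft : pvFm before t with
    | none =>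
      rw [show (t.foldl (fun acc x => match acc with | none => some x | some m => if before x m then some x else some m) none) = none from hft]
    | some b =>
      rw [show (t.foldl (fun acc x => match acc with | none => some x | some m => if before x m then some x else some m) none) = some b from hft]
      by_cases h : before x b = true <;> simp [h]

-- the boolean predicates A filters with
def pvValid (m : List (String × Int)) : Bool := !(decide (pvStartA m ≤ 0) || decide (pvEndA m ≤ 0))
def pvExact (cs ce : Int) (m : List (String × Int)) : Bool := decide (pvStartA m = cs) && decide (pvEndA m = ce)
def pvEncl (cs ce : Int) (m : List (String × Int)) : Bool := decide (pvStartA m ≤ cs) && decide (pvEndA m ≥ ce)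
def pvOvl (cs ce : Int) (m : List (String × Int)) : Bool := pvRangesOverlap (pvStartA m) (pvEndA m) cs ce

-- comparison of indexed methods by (span, start): the sort key of A
def pvLtSp (a b : Int × List (String × Int)) : Bool :=
  decide (pvSpanA a.2 < pvSpanA b.2) || (!decide (pvSpanA b.2 < pvSpanA a.2) && decide (pvStartA a.2 < pvStartA b.2))

def pvLtK (a b : (Int × Int × Int × Int) × List (String × Int)) : Bool := pvKeyLt a.1 b.1

-- A's selection, run on the indexed method list
def pvAidx (cs ce : Int) (E : List (Int × List (String × Int))) : Option (Int × List (String × Int)) :=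
  match (E.filter (fun p => pvValid p.2)).find? (fun p => pvExact cs ce p.2) with
  | some p => some p
  | none =>
    match pvFm pvLtSp ((E.filter (fun p => pvValid p.2)).filter (fun p => pvEncl cs ce p.2)) with
    | some p => some p
    | none => pvFm pvLtSp ((E.filter (fun p => pvValid p.2)).filter (fun p => pvOvl cs ce p.2))

def pvKeyOf (cs ce : Int) (p : Int × List (String × Int)) : Int × Int × Int × Int :=
  if pvExact cs ce p.2 then (0, 0, 0, p.1)
  else if pvEncl cs ce p.2 then (1, pvSpanA p.2, pvStartA p.2, p.1)
  else (2, pvSpanA p.2, pvStartA p.2, p.1)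

theorem pvCand_eq (idx : Int) (m : List (String × Int)) (cs ce : Int) :
    pvCand idx m cs ce =
      if pvValid m then
        (if pvExact cs ce m then some (0, 0, 0, idx)
         else if pvEncl cs ce m then some (1, pvSpanA m, pvStartA m, idx)
         else if pvOvl cs ce m then some (2, pvSpanA m, pvStartA m, idx)
         else none)
      else none := by
  show (if (decide (pvStartA m ≤ 0) || decide (pvEndA m ≤ 0)) = true then none
        else if (decide (pvStartA m = cs) && decide (pvEndA m = ce)) = true then some (0, 0, 0, idx)
        else if (decide (pvStartA m ≤ cs) && decide (pvEndA m ≥ ce)) = true then some (1, pvSpanA m, pvStartA m, idx)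
        else if (!(decide (pvEndA m < cs) || decide (ce < pvStartA m))) = true then some (2, pvSpanA m, pvStartA m, idx)
        else none) = _
  simp only [pvValid, pvExact, pvEncl, pvOvl, pvRangesOverlap]
  cases h1 : (decide (pvStartA m ≤ 0) || decide (pvEndA m ≤ 0)) <;> simp [h1]

theorem pvLtSp_trans : ∀ a b c, pvLtSp a b = true → pvLtSp b c = true → pvLtSp a c = true := by
  intro a b c hab hbc
  simp only [pvLtSp, Bool.or_eq_true, Bool.and_eq_true, Bool.not_eq_true', decide_eq_true_eq, decide_eq_false_iff_not] at *
  omega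

theorem pvLtSp_negtrans : ∀ a b c, pvLtSp a b = false → pvLtSp b c = false → pvLtSp a c = false := by
  intro a b c hab hbc
  simp only [pvLtSp, Bool.or_eq_false_iff, Bool.and_eq_false_iff, Bool.not_eq_false', decide_eq_true_eq, decide_eq_false_iff_not] at *
  omega

theorem pvLtK_trans : ∀ a b c, pvLtK a b = true → pvLtK b c = true → pvLtK a c = true := by
  intro a b c hab hbc
  simp only [pvLtK, pvKeyLt, Bool.or_eq_true, Bool.and_eq_true, beq_iff_eq, decide_eq_true_eq] at *
  omega

theorem pvLtK_negtrans : ∀ a b c, pvLtK a b = false → pvLtK b c = false → pvLtK a c = false := by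
  intro a b c hab hbc
  simp only [pvLtK, pvKeyLt, Bool.or_eq_false_iff, Bool.and_eq_false_iff, beq_iff_eq, beq_eq_false_iff_ne, decide_eq_true_eq, decide_eq_false_iff_not] at *
  omega

theorem pvMem_enumerate_ge {α : Type} (l : List α) (i : Int) (p : Int × α)
    (h : p ∈ PySem.List.enumerate l i) : i ≤ p.1 := by
  induction l generalizing i with
  | nil => cases h
  | cons x t ih =>
    have hc : PySem.List.enumerate (x :: t) i = (i, x) :: PySem.List.enumerate t (i + 1) := rfl
    rw [hc, List.mem_cons] at h
    rcases h with h | h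
    · simp [h]
    · have := ih (i + 1) h
      omega

theorem pvAidx_idx_ge (cs ce : Int) (l : List (List (String × Int))) (i : Int) (p : Int × List (String × Int))
    (h : pvAidx cs ce (PySem.List.enumerate l i) = some p) : i ≤ p.1 := by
  have hmem : p ∈ PySem.List.enumerate l i := by
    simp only [pvAidx] at h
    cases hf : (List.filter (fun p => pvValid p.2) (PySem.List.enumerate l i)).find? (fun p => pvExact cs ce p.2) with
    | some q =>
      rw [hf] at h
      cases h
      exact List.mem_of_mem_filter (List.mem_of_find?_eq_some hf)
    | none =>
      rw [hf] at h
      cases he : pvFm pvLtSp ((List.filter (fun p => pvValid p.2) (PySem.List.enumerate l i)).filter (fun p => pvEncl cs ce p.2)) with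
      | some q =>
        rw [he] at h
        cases h
        exact List.mem_of_mem_filter (List.mem_of_mem_filter (pvFm_mem _ _ _ he))
      | none =>
        rw [he] at h
        exact List.mem_of_mem_filter (List.mem_of_mem_filter (pvFm_mem _ _ _ h))
  exact pvMem_enumerate_ge l i p hmem

theorem pvKeyLt_tier_lt (t t' sp st j sp' st' j' : Int) (h : t < t') :
    pvKeyLt (t, sp, st, j) (t', sp', st', j') = true := by
  simp only [pvKeyLt, Bool.or_eq_true, Bool.and_eq_true, beq_iff_eq, decide_eq_true_eq]
  omega

theorem pvKeyLt_tier_gt (t t' sp st j sp' st' j' : Int) (h : t' < t) :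
    pvKeyLt (t, sp, st, j) (t', sp', st', j') = false := by
  simp only [pvKeyLt, Bool.or_eq_false_iff, Bool.and_eq_false_iff, beq_eq_false_iff_ne, decide_eq_false_iff_not, ne_eq]
  omega

theorem pvKeyLt_same_tier (t sp st j sp' st' j' : Int) (h : j' < j) :
    pvKeyLt (t, sp, st, j) (t, sp', st', j')
      = (decide (sp < sp') || (!decide (sp' < sp) && decide (st < st'))) := by
  rw [Bool.eq_iff_iff]
  simp only [pvKeyLt, Bool.or_eq_true, Bool.and_eq_true, Bool.not_eq_true',
    decide_eq_false_iff_not, beq_iff_eq, decide_eq_true_eq, true_and, lt_self_iff_false, false_or]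
  omega

-- the master correspondence: B's running minimum = A's staged selection, with indices
theorem pvMaster (cs ce : Int) (l : List (List (String × Int))) : ∀ (i : Int),
    pvFm pvLtK ((PySem.List.enumerate l i).filterMap (fun p => (pvCand p.1 p.2 cs ce).map (fun k => (k, p.2))))
      = Option.map (fun p => (pvKeyOf cs ce p, p.2)) (pvAidx cs ce (PySem.List.enumerate l i)) := by
  induction l with
  | nil => intro i; rfl
  | cons m t ih =>
    intro i
    have henum : PySem.List.enumerate (m :: t) i = (i, m) :: PySem.List.enumerate t (i + 1) := rfl
    rw [henum]
    simp only [List.filterMap_cons]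
    rw [pvCand_eq]
    unfold pvAidx
    simp only [List.filter_cons]
    by_cases hv : pvValid m = true
    case neg =>
      simp only [hv, Bool.false_eq_true, if_false, reduceIte]
      exact ih (i + 1)
    case pos =>
    simp only [hv, if_true, reduceIte]
    by_cases hex : pvExact cs ce m = true
    case pos =>
      simp only [hex, if_true, reduceIte, Option.map_some]
      rw [pvFm_cons pvLtK pvLtK_trans pvLtK_negtrans, ih (i + 1)]
      rw [List.find?_cons_of_pos (by simpa using hex)]
      cases hres : pvAidx cs ce (PySem.List.enumerate t (i + 1)) with
      | none => simp [hres, pvKeyOf, hex]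
      | some q =>
        have hge := pvAidx_idx_ge cs ce t (i + 1) q hres
        have hnlt : pvLtK (pvKeyOf cs ce q, q.2) ((0, 0, 0, i), m) = false := by
          simp only [pvLtK]
          by_cases hq1 : pvExact cs ce q.2 = true
          · rw [show pvKeyOf cs ce q = (0, 0, 0, q.1) from by simp [pvKeyOf, hq1]]
            rw [pvKeyLt_same_tier 0 0 0 q.1 0 0 i (by omega)]
            simp
          · by_cases hq2 : pvEncl cs ce q.2 = true
            · rw [show pvKeyOf cs ce q = (1, pvSpanA q.2, pvStartA q.2, q.1) from by simp [pvKeyOf, hq1, hq2]]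
              exact pvKeyLt_tier_gt 1 0 _ _ _ _ _ _ (by omega)
            · rw [show pvKeyOf cs ce q = (2, pvSpanA q.2, pvStartA q.2, q.1) from by simp [pvKeyOf, hq1, hq2]]
              exact pvKeyLt_tier_gt 2 0 _ _ _ _ _ _ (by omega)
        simp only [Option.map_some, hnlt, Bool.false_eq_true, reduceIte]
        simp [pvKeyOf, hex]
    case neg =>
      simp only [hex, Bool.false_eq_true, if_false, reduceIte]
      rw [List.find?_cons_of_neg (by simpa using hex)]
      by_cases hen : pvEncl cs ce m = true
      case pos =>
        simp only [hen, if_true, reduceIte, Option.map_some]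
        rw [pvFm_cons pvLtK pvLtK_trans pvLtK_negtrans, ih (i + 1)]
        rw [List.filter_cons_of_pos (by simpa using hen)]
        cases hf : List.find? (fun p => pvExact cs ce p.2) (List.filter (fun p => pvValid p.2) (PySem.List.enumerate t (i + 1))) with
        | some p =>
          have hres : pvAidx cs ce (PySem.List.enumerate t (i + 1)) = some p := by
            unfold pvAidx; rw [hf]
          have hpex : pvExact cs ce p.2 = true := by simpa using List.find?_some hf
          have hge : i + 1 ≤ p.1 := pvAidx_idx_ge cs ce t (i + 1) p hres
          have hlt : pvLtK (pvKeyOf cs ce p, p.2) ((1, pvSpanA m, pvStartA m, i), m) = true := by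
            simp only [pvLtK]
            rw [show pvKeyOf cs ce p = (0, 0, 0, p.1) from by simp [pvKeyOf, hpex]]
            exact pvKeyLt_tier_lt 0 1 _ _ _ _ _ _ (by omega)
          rw [hres]
          simp [hlt]
        | none =>
          have hnoex : ∀ x ∈ List.filter (fun p => pvValid p.2) (PySem.List.enumerate t (i + 1)), ¬ pvExact cs ce x.2 = true := List.find?_eq_none.1 hf
          rw [pvFm_cons pvLtSp pvLtSp_trans pvLtSp_negtrans]
          cases he : pvFm pvLtSp (List.filter (fun p => pvEncl cs ce p.2) (List.filter (fun p => pvValid p.2) (PySem.List.enumerate t (i + 1)))) with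
          | some q =>
            have hres : pvAidx cs ce (PySem.List.enumerate t (i + 1)) = some q := by
              unfold pvAidx; rw [hf, he]
            have hqmem := pvFm_mem _ _ _ he
            have hqen : pvEncl cs ce q.2 = true := by simpa using (List.mem_filter.1 hqmem).2
            have hqex : ¬ pvExact cs ce q.2 = true := hnoex q (List.mem_of_mem_filter hqmem)
            have hge : i + 1 ≤ q.1 := pvAidx_idx_ge cs ce t (i + 1) q hres
            have hkey : pvKeyOf cs ce q = (1, pvSpanA q.2, pvStartA q.2, q.1) := by simp [pvKeyOf, hqex, hqen]
            have hcmp : pvLtK (pvKeyOf cs ce q, q.2) ((1, pvSpanA m, pvStartA m, i), m) = pvLtSp q (i, m) := by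
              simp only [pvLtK, hkey]
              rw [pvKeyLt_same_tier 1 (pvSpanA q.2) (pvStartA q.2) q.1 (pvSpanA m) (pvStartA m) i (by omega)]
              rfl
            rw [hres]
            simp only [Option.map_some]
            by_cases hc : pvLtSp q (i, m) = true
            · simp [hcmp, hc]
            · rw [hcmp]
              simp [hc, pvKeyOf, hex, hen]
          | none =>
            have hqe := (pvFm_nil_iff pvLtSp _).1 he
            have hres : pvAidx cs ce (PySem.List.enumerate t (i + 1)) = pvFm pvLtSp (List.filter (fun p => pvOvl cs ce p.2) (List.filter (fun p => pvValid p.2) (PySem.List.enumerate t (i + 1)))) := by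
              unfold pvAidx; rw [hf, he]
            rw [hres]
            cases ho : pvFm pvLtSp (List.filter (fun p => pvOvl cs ce p.2) (List.filter (fun p => pvValid p.2) (PySem.List.enumerate t (i + 1)))) with
            | some r =>
              have hrmem := pvFm_mem _ _ _ ho
              have hrex : ¬ pvExact cs ce r.2 = true := hnoex r (List.mem_of_mem_filter hrmem)
              have hren : ¬ pvEncl cs ce r.2 = true := by
                intro hr
                have hmem2 : r ∈ List.filter (fun p => pvEncl cs ce p.2) (List.filter (fun p => pvValid p.2) (PySem.List.enumerate t (i + 1))) :=
                  List.mem_filter.2 ⟨List.mem_of_mem_filter hrmem, by simpa using hr⟩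
                rw [hqe] at hmem2
                cases hmem2
              have hkey : pvKeyOf cs ce r = (2, pvSpanA r.2, pvStartA r.2, r.1) := by simp [pvKeyOf, hrex, hren]
              have hnlt : pvLtK (pvKeyOf cs ce r, r.2) ((1, pvSpanA m, pvStartA m, i), m) = false := by
                simp only [pvLtK, hkey]
                exact pvKeyLt_tier_gt 2 1 _ _ _ _ _ _ (by omega)
              simp only [Option.map_some, hnlt, Bool.false_eq_true, reduceIte]
              simp [pvKeyOf, hex, hen]
            | none =>
              simp [pvKeyOf, hex, hen]
      case neg =>
        rw [List.filter_cons_of_neg (by simpa using hen)]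
        by_cases hov : pvOvl cs ce m = true
        case pos =>
          simp only [hen, Bool.false_eq_true, if_false, hov, if_true, reduceIte, Option.map_some]
          rw [pvFm_cons pvLtK pvLtK_trans pvLtK_negtrans, ih (i + 1)]
          rw [List.filter_cons_of_pos (by simpa using hov)]
          cases hf : List.find? (fun p => pvExact cs ce p.2) (List.filter (fun p => pvValid p.2) (PySem.List.enumerate t (i + 1))) with
          | some p =>
            have hres : pvAidx cs ce (PySem.List.enumerate t (i + 1)) = some p := by
              unfold pvAidx; rw [hf]
            have hpex : pvExact cs ce p.2 = true := by simpa using List.find?_some hf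
            have hge : i + 1 ≤ p.1 := pvAidx_idx_ge cs ce t (i + 1) p hres
            have hlt : pvLtK (pvKeyOf cs ce p, p.2) ((2, pvSpanA m, pvStartA m, i), m) = true := by
              simp only [pvLtK]
              rw [show pvKeyOf cs ce p = (0, 0, 0, p.1) from by simp [pvKeyOf, hpex]]
              exact pvKeyLt_tier_lt 0 2 _ _ _ _ _ _ (by omega)
            rw [hres]
            simp [hlt]
          | none =>
            have hnoex : ∀ x ∈ List.filter (fun p => pvValid p.2) (PySem.List.enumerate t (i + 1)), ¬ pvExact cs ce x.2 = true := List.find?_eq_none.1 hf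
            cases he : pvFm pvLtSp (List.filter (fun p => pvEncl cs ce p.2) (List.filter (fun p => pvValid p.2) (PySem.List.enumerate t (i + 1)))) with
            | some q =>
              have hres : pvAidx cs ce (PySem.List.enumerate t (i + 1)) = some q := by
                unfold pvAidx; rw [hf, he]
              have hqmem := pvFm_mem _ _ _ he
              have hqen : pvEncl cs ce q.2 = true := by simpa using (List.mem_filter.1 hqmem).2
              have hqex : ¬ pvExact cs ce q.2 = true := hnoex q (List.mem_of_mem_filter hqmem)
              have hkey : pvKeyOf cs ce q = (1, pvSpanA q.2, pvStartA q.2, q.1) := by simp [pvKeyOf, hqex, hqen]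
              have hlt : pvLtK (pvKeyOf cs ce q, q.2) ((2, pvSpanA m, pvStartA m, i), m) = true := by
                simp only [pvLtK, hkey]
                exact pvKeyLt_tier_lt 1 2 _ _ _ _ _ _ (by omega)
              rw [hres]
              simp [hlt]
            | none =>
              have hqe := (pvFm_nil_iff pvLtSp _).1 he
              have hres : pvAidx cs ce (PySem.List.enumerate t (i + 1)) = pvFm pvLtSp (List.filter (fun p => pvOvl cs ce p.2) (List.filter (fun p => pvValid p.2) (PySem.List.enumerate t (i + 1)))) := by
                unfold pvAidx; rw [hf, he]
              rw [hres]
              rw [pvFm_cons pvLtSp pvLtSp_trans pvLtSp_negtrans]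
              cases ho : pvFm pvLtSp (List.filter (fun p => pvOvl cs ce p.2) (List.filter (fun p => pvValid p.2) (PySem.List.enumerate t (i + 1)))) with
              | some r =>
                have hrmem := pvFm_mem _ _ _ ho
                have hrex : ¬ pvExact cs ce r.2 = true := hnoex r (List.mem_of_mem_filter hrmem)
                have hren : ¬ pvEncl cs ce r.2 = true := by
                  intro hr
                  have hmem2 : r ∈ List.filter (fun p => pvEncl cs ce p.2) (List.filter (fun p => pvValid p.2) (PySem.List.enumerate t (i + 1))) :=
                    List.mem_filter.2 ⟨List.mem_of_mem_filter hrmem, by simpa using hr⟩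
                  rw [hqe] at hmem2
                  cases hmem2
                have hrge : i + 1 ≤ r.1 := by
                  have := List.mem_of_mem_filter (List.mem_of_mem_filter hrmem)
                  exact pvMem_enumerate_ge t (i + 1) r this
                have hkey : pvKeyOf cs ce r = (2, pvSpanA r.2, pvStartA r.2, r.1) := by simp [pvKeyOf, hrex, hren]
                have hcmp : pvLtK (pvKeyOf cs ce r, r.2) ((2, pvSpanA m, pvStartA m, i), m) = pvLtSp r (i, m) := by
                  simp only [pvLtK, hkey]
                  rw [pvKeyLt_same_tier 2 (pvSpanA r.2) (pvStartA r.2) r.1 (pvSpanA m) (pvStartA m) i (by omega)]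
                  rfl
                simp only [Option.map_some]
                by_cases hc : pvLtSp r (i, m) = true
                · simp [hcmp, hc]
                · rw [hcmp]
                  simp [hc, pvKeyOf, hex, hen, hov]
              | none =>
                simp [pvKeyOf, hex, hen, hov]
        case neg =>
          simp only [hen, hov, Bool.false_eq_true, if_false, reduceIte, Option.map_none]
          rw [ih (i + 1)]
          rw [List.filter_cons_of_neg (by simpa using hov)]
          rfl

-- B as the first minimum of the candidate list
theorem pvB_eq (methods : List (List (String × Int))) (cs ce : Int) :
    choose_enclosing_method_alt methods cs ce =
      match pvFm pvLtK ((PySem.List.enumerate methods 0).filterMap (fun p => (pvCand p.1 p.2 cs ce).map (fun k => (k, p.2)))) with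
      | none => (none, false)
      | some b => (some b.2, b.1.1 == 0) := by
  have haux : ∀ (E : List (Int × List (String × Int))) (acc : Option ((Int × Int × Int × Int) × List (String × Int))),
      E.foldl (fun best p =>
        match pvCand p.1 p.2 cs ce with
        | none => best
        | some k =>
          match best with
          | none => some (k, p.2)
          | some b => if pvKeyLt k b.1 then some (k, p.2) else some b) acc
      = (E.filterMap (fun p => (pvCand p.1 p.2 cs ce).map (fun k => (k, p.2)))).foldl
          (fun acc x => match acc with | none => some x | some m => if pvLtK x m then some x else some m) acc := by
    intro E
    induction E with
    | nil => intro acc; rfl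
    | cons p E ih =>
      intro acc
      rw [List.foldl_cons, List.filterMap_cons]
      cases hc : pvCand p.1 p.2 cs ce with
      | none => simp only [hc]; exact ih _
      | some k =>
        simp only [hc, Option.map_some]
        rw [List.foldl_cons]
        exact ih _
  show (match (PySem.List.enumerate methods 0).foldl
      (fun best p =>
        match pvCand p.1 p.2 cs ce with
        | none => best
        | some k =>
          match best with
          | none => some (k, p.2)
          | some b => if pvKeyLt k b.1 then some (k, p.2) else some b) none with
    | none => ((none : Option (List (String × Int))), false)
    | some b => (some b.2, b.1.1 == 0)) = _
  rw [haux]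
  have hfold : ((PySem.List.enumerate methods 0).filterMap (fun p => (pvCand p.1 p.2 cs ce).map (fun k => (k, p.2)))).foldl
      (fun acc x => match acc with | none => some x | some m => if pvLtK x m then some x else some m) none
      = pvFm pvLtK ((PySem.List.enumerate methods 0).filterMap (fun p => (pvCand p.1 p.2 cs ce).map (fun k => (k, p.2)))) := by
    unfold pvFm
    congr 1
    funext acc x
    cases acc <;> rfl
  rw [hfold]

-- head of A's stable sort, as a first minimum
theorem pvSortedHead (X : List (List (String × Int))) :
    (PySem.List.sorted2 X pvSpanA pvStartA).head? =
      pvFm (fun a b => decide (pvSpanA a < pvSpanA b) || (!decide (pvSpanA b < pvSpanA a) && decide (pvStartA a < pvStartA b))) X := by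
  show (X.foldl (fun acc x => PySem.List.insertBy _ x acc) []).head? = _
  exact pvHead_foldl_insertBy _ X

theorem pvSortedHead_map (Y : List (Int × List (String × Int))) :
    (PySem.List.sorted2 (Y.map Prod.snd) pvSpanA pvStartA).head? = Option.map Prod.snd (pvFm pvLtSp Y) := by
  rw [pvSortedHead, pvFm_map]
  rfl

-- A in terms of pvAidx
theorem pvA_eq (methods : List (List (String × Int))) (cs ce : Int) :
    choose_enclosing_method methods cs ce =
      match pvAidx cs ce (PySem.List.enumerate methods 0) with
      | none => (none, false)
      | some p => (some p.2, pvExact cs ce p.2) := by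
  have hE : (PySem.List.enumerate methods 0).map Prod.snd = methods := by
    simp
  have hA : choose_enclosing_method methods cs ce =
      (let ms := methods.filter pvValid
       if ms.isEmpty then (none, false)
       else
         match ms.find? (pvExact cs ce) with
         | some m => (some m, true)
         | none =>
           let enclosing := ms.filter (pvEncl cs ce)
           if enclosing.isEmpty then
             let overlapping := ms.filter (pvOvl cs ce)
             if overlapping.isEmpty then (none, false)
             else ((PySem.List.sorted2 overlapping pvSpanA pvStartA).head?, false)
           else ((PySem.List.sorted2 enclosing pvSpanA pvStartA).head?, false)) := rfl
  rw [hA]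
  have hms : methods.filter pvValid
      = ((PySem.List.enumerate methods 0).filter (fun p => pvValid p.2)).map Prod.snd := by
    conv_lhs => rw [← hE]
    rw [List.filter_map]
    rfl
  simp only [hms, List.filter_map, List.find?_map, pvSortedHead_map, Function.comp_def]
  unfold pvAidx
  by_cases hE0 : (PySem.List.enumerate methods 0).filter (fun p => pvValid p.2) = []
  · simp [hE0, pvFm]
  · have hne : (((PySem.List.enumerate methods 0).filter (fun p => pvValid p.2)).map Prod.snd).isEmpty = false := by
      simp [List.isEmpty_iff, hE0]
    rw [if_neg (by simp [hne])]
    cases hf : ((PySem.List.enumerate methods 0).filter (fun p => pvValid p.2)).find? (fun p => pvExact cs ce p.2) with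
    | some p =>
      simp only [hf, Option.map_some]
      have hex := List.find?_some hf
      simp [hex]
    | none =>
      simp only [hf, Option.map_none]
      have hnoex : ∀ x ∈ (PySem.List.enumerate methods 0).filter (fun p => pvValid p.2), pvExact cs ce x.2 = false := by
        intro x hx
        have := List.find?_eq_none.1 hf x hx
        simpa using this
      cases hq : pvFm pvLtSp (((PySem.List.enumerate methods 0).filter (fun p => pvValid p.2)).filter (fun p => pvEncl cs ce p.2)) with
      | some q =>
        have hqmem := pvFm_mem _ _ _ hq
        have hqne : (((PySem.List.enumerate methods 0).filter (fun p => pvValid p.2)).filter (fun p => pvEncl cs ce p.2)) ≠ [] := by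
          intro h0; rw [h0] at hq; simp [pvFm] at hq
        have hqmapne : ((((PySem.List.enumerate methods 0).filter (fun p => pvValid p.2)).filter (fun p => pvEncl cs ce p.2)).map Prod.snd) ≠ [] := by
          simpa [List.map_eq_nil_iff] using hqne
        rw [if_neg (by simp only [List.isEmpty_iff]; exact hqmapne)]
        have hqex : pvExact cs ce q.2 = false := hnoex q (List.mem_of_mem_filter hqmem)
        simp [hq, hqex]
      | none =>
        have hqe : (((PySem.List.enumerate methods 0).filter (fun p => pvValid p.2)).filter (fun p => pvEncl cs ce p.2)) = [] :=
          (pvFm_nil_iff _ _).1 hq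
        rw [if_pos (by simp [hqe])]
        cases hr : pvFm pvLtSp (((PySem.List.enumerate methods 0).filter (fun p => pvValid p.2)).filter (fun p => pvOvl cs ce p.2)) with
        | some r =>
          have hrmem := pvFm_mem _ _ _ hr
          have hrne : (((PySem.List.enumerate methods 0).filter (fun p => pvValid p.2)).filter (fun p => pvOvl cs ce p.2)) ≠ [] := by
            intro h0; rw [h0] at hr; simp [pvFm] at hr
          have hrmapne : ((((PySem.List.enumerate methods 0).filter (fun p => pvValid p.2)).filter (fun p => pvOvl cs ce p.2)).map Prod.snd) ≠ [] := by
            simpa [List.map_eq_nil_iff] using hrne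
          rw [if_neg (by simp only [List.isEmpty_iff]; exact hrmapne)]
          have hrex : pvExact cs ce r.2 = false := hnoex r (List.mem_of_mem_filter hrmem)
          simp [hr, hrex]
        | none =>
          have hre : (((PySem.List.enumerate methods 0).filter (fun p => pvValid p.2)).filter (fun p => pvOvl cs ce p.2)) = [] :=
            (pvFm_nil_iff _ _).1 hr
          rw [if_pos (by simp [hre])]

-- ===== VERDICT (by name: the statement is the Claim_ definition above) =====
theorem choose_enclosing_method_spec : Claim_equal_choose_enclosing_method := by
  intro methods cs ce _
  unfold Spec_choose_enclosing_method
  rw [pvB_eq, pvA_eq, pvMaster]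
  cases h : pvAidx cs ce (PySem.List.enumerate methods 0) with
  | none => rfl
  | some p =>
    simp only [Option.map_some]
    have : ((pvKeyOf cs ce p).1 == 0) = pvExact cs ce p.2 := by
      unfold pvKeyOf
      split_ifs with h1 h2 <;> simp_all
    rw [this]
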